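-- pv_equiv track=rewrite | github.com/jksdf/IV122 | src/week1/Solution.py | a4
-- ===== SOURCE A (Python) =====
-- import math
--
-- def a4(limit=1000):
--     sm = 0
--     for p in genprimes():
--         if p >= limit:
--             break
--         if '3' not in str(p):
--             sm += p
--     return str(sm)
--
-- def isprime(n):
--     for i in range(1, int(math.sqrt(n))):
--         i += 1
--         if n % i == 0:
--             return False
--     return True
--
-- def genprimes():
--     n = 2
--     while True:
--         while not isprime(n):
--             n += 1
--         yield n
--         n += 1
-- ===== SOURCE B (Python) =====
-- def a4(limit=1000):
--     # Sieve of Eratosthenes up to limit, then sum the primes whose decimal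
--     # representation contains no digit '3'.
--     n = limit if limit > 0 else 0
--     sieve = [True] * n
--     i = 2
--     while i * i < n:
--         j = i * i
--         while j < n:
--             sieve[j] = False
--             j += i
--         i += 1
--     total = 0
--     p = 2
--     while p < n:
--         if sieve[p] and '3' not in str(p):
--             total += p
--         p += 1
--     return str(total)
-- ===== Notes on version B (the rewrite author's own statement) =====
-- stated objective: faster
-- what changed: Replaces per-number trial division over a prime generator with a Sieve of Eratosthenes array up to limit followed by a single filter-and-sum pass.
import Mathlib
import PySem

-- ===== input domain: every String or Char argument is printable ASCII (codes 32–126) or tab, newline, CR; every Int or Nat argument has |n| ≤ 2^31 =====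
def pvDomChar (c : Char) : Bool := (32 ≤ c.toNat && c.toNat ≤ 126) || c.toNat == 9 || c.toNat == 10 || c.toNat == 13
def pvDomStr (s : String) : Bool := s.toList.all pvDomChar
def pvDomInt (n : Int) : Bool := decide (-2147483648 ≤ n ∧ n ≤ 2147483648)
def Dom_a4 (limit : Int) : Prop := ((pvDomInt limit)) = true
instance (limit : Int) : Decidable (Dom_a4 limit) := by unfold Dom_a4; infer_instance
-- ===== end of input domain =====

-- B replaces A's per-number trial division with a Sieve of Eratosthenes up to limit
-- followed by one filter-and-sum pass.

-- ===== PORT A =====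
-- isprime(n): for i in range(1, int(math.sqrt(n))): i += 1; if n % i == 0: return False.
-- int(math.sqrt(n)) is ported as Nat.sqrt n.toNat, exact on the domain |n| ≤ 2^31
-- (there the correctly rounded double sqrt truncates to the integer square root).
def isprimeA (n : Int) : Bool :=
  (PySem.List.pyRange 1 ((Nat.sqrt n.toNat : Nat) : Int) 1).all
    (fun i => !(PySem.Int.mod n (i + 1) == 0))

-- A iterates genprimes() (which scans n = 2, 3, 4, … testing isprime) and breaks at the
-- first prime p ≥ limit; the isprime tests at n ≥ limit cannot add to sm, so the scan is
-- ported as stopping at n = limit, which returns the same sum.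
def a4Loop (limit : Int) (n : Int) (sm : Int) : Int :=
  if n < limit then
    a4Loop limit (n + 1)
      (if isprimeA n && !(PySem.Str.isIn "3" (PySem.Int.toStr n)) then sm + n else sm)
  else sm
termination_by (limit - n).toNat
decreasing_by omega

def a4 (limit : Int) : String := PySem.Int.toStr (a4Loop limit 2 0)

-- ===== PORT B =====
-- inner while of Source B: j = i*i; while j < n: sieve[j] = False; j += i
-- (the i = 0 branch is a termination guard only; B's caller always passes i ≥ 2)
def markB (n : Nat) (i : Nat) (j : Nat) (s : List Bool) : List Bool :=
  if j < n then
    if i = 0 then s else markB n i (j + i) (s.set j false)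
  else s
termination_by n - j
decreasing_by omega

-- outer while of Source B: while i*i < n: mark the multiples of i from i*i on; i += 1
def sieveLoopB (n : Nat) (i : Nat) (s : List Bool) : List Bool :=
  if i * i < n then sieveLoopB n (i + 1) (markB n i (i * i) s) else s
termination_by n - i
decreasing_by
  rcases Nat.eq_zero_or_pos i with h0 | h0
  · omega
  · have : i * 1 ≤ i * i := Nat.mul_le_mul_left i h0
    omega

-- final while of Source B: p from 2 to n-1, summing p when sieve[p] and '3' not in str(p)
def sumB (n : Nat) (sieve : List Bool) (p : Nat) (sm : Int) : Int :=
  if p < n then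
    sumB n sieve (p + 1)
      (if sieve.getD p false && !(PySem.Str.isIn "3" (PySem.Int.toStr (p : Int)))
       then sm + (p : Int) else sm)
  else sm
termination_by n - p
decreasing_by omega

-- Source B's 'n = limit if limit > 0 else 0' is limit.toNat; Python's always-in-range
-- indexing sieve[p] (0 ≤ p < n = len(sieve)) is List.getD
def a4_alt (limit : Int) : String :=
  let n := limit.toNat
  let sieve := sieveLoopB n 2 (List.replicate n true)
  PySem.Int.toStr (sumB n sieve 2 0)

-- ===== PRECONDITION & SPEC =====
def Spec_a4 (limit : Int) (out : String) : Prop := out = a4_alt limit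
instance (limit : Int) (out : String) : Decidable (Spec_a4 limit out) := by unfold Spec_a4; infer_instance

-- ===== CLAIM (what is proved, stated in full; the proofs are below) =====
def Claim_equal_a4 : Prop := ∀ (limit : Int), Dom_a4 limit → Spec_a4 limit (a4 limit)

-- ===== LEMMAS AND PROOFS =====

-- "p has no divisor d with 2 ≤ d and d² ≤ p" — the property both primality tests decide
def NoSmallDiv (p : Nat) : Prop := ∀ d : Nat, 2 ≤ d → d * d ≤ p → ¬ d ∣ p

lemma isprimeA_char (p : Nat) : isprimeA (p : Int) = true ↔ NoSmallDiv p := by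
  unfold isprimeA NoSmallDiv
  rw [List.all_eq_true]
  constructor
  · intro h d hd2 hdd hdvd
    have hds : d ≤ Nat.sqrt p := Nat.le_sqrt.mpr hdd
    have hmem : ((d : Int) - 1) ∈ PySem.List.pyRange 1 ((Nat.sqrt (Int.toNat p) : Nat) : Int) 1 := by
      rw [PySem.List.mem_pyRange_one]
      simp only [Int.toNat_natCast]
      omega
    have := h _ hmem
    simp only [Bool.not_eq_eq_eq_not, Bool.not_true, beq_eq_false_iff_ne, ne_eq] at this
    apply this
    rw [PySem.Int.mod_eq_zero_iff_dvd]
    have : ((d : Int) - 1 + 1) = (d : Int) := by ring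
    rw [this]
    exact_mod_cast hdvd
  · intro h x hx
    rw [PySem.List.mem_pyRange_one] at hx
    simp only [Int.toNat_natCast] at hx
    simp only [Bool.not_eq_eq_eq_not, Bool.not_true, beq_eq_false_iff_ne, ne_eq]
    intro hmod
    rw [PySem.Int.mod_eq_zero_iff_dvd] at hmod
    set d : Nat := (x + 1).toNat with hd
    have hxd : (x + 1 : Int) = (d : Nat) := by omega
    have hd2 : 2 ≤ d := by omega
    have hdsq : d ≤ Nat.sqrt p := by omega
    have hdd : d * d ≤ p := Nat.le_sqrt.mp hdsq
    exact h d hd2 hdd (by rw [hxd] at hmod; exact_mod_cast hmod)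

lemma markB_getD (n i : Nat) (hi : 0 < i) (j : Nat) (s : List Bool) (p : Nat) :
    (markB n i j s).getD p false =
      if j ≤ p ∧ p < n ∧ i ∣ (p - j) then false else s.getD p false := by
  rw [markB]
  by_cases h : j < n
  · simp only [h, if_true]
    have hine : ¬ i = 0 := by omega
    simp only [hine, if_false]
    rw [markB_getD n i hi (j + i) (s.set j false) p]
    by_cases hpj : p = j
    · subst hpj
      have h1 : ¬ (p + i ≤ p ∧ p < n ∧ i ∣ (p - (p + i))) := by omega
      have h2 : p ≤ p ∧ p < n ∧ i ∣ (p - p) := ⟨le_refl p, h, by simp⟩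
      rw [if_neg h1, if_pos h2]
      by_cases hl : p < s.length
      · rw [List.getD_eq_getElem?_getD, List.getElem?_set_self (by omega)]
        simp
      · rw [List.getD_eq_getElem?_getD, List.getElem?_set]
        simp [hl]
    · have hset : (s.set j false).getD p false = s.getD p false := by
        rw [List.getD_eq_getElem?_getD, List.getD_eq_getElem?_getD,
          List.getElem?_set_ne (by omega)]
      rw [hset]
      have hiff : (j + i ≤ p ∧ p < n ∧ i ∣ (p - (j + i))) ↔ (j ≤ p ∧ p < n ∧ i ∣ (p - j)) := by
        constructor
        · rintro ⟨h1, h2, h3⟩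
          refine ⟨by omega, h2, ?_⟩
          have : p - j = (p - (j + i)) + i := by omega
          rw [this]
          exact Nat.dvd_add h3 dvd_rfl
        · rintro ⟨h1, h2, h3⟩
          have hjp : j < p := by omega
          have hge : i ≤ p - j := Nat.le_of_dvd (by omega) h3
          refine ⟨by omega, h2, ?_⟩
          have : p - (j + i) = (p - j) - i := by omega
          rw [this]
          exact Nat.dvd_sub h3 dvd_rfl
      rw [if_congr hiff rfl rfl]
  · simp only [h, if_false]
    have : ¬ (j ≤ p ∧ p < n ∧ i ∣ (p - j)) := by omega
    simp [this]
termination_by n - j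
decreasing_by omega

lemma sieve_invariant (n I : Nat) (s : List Bool) (hI : 2 ≤ I)
    (hinv : ∀ p, s.getD p false = true ↔
      (p < n ∧ ∀ d, d < I → 2 ≤ d → d * d ≤ p → ¬ d ∣ p)) :
    ∀ p, (sieveLoopB n I s).getD p false = true ↔ (p < n ∧ NoSmallDiv p) := by
  rw [sieveLoopB]
  by_cases h : I * I < n
  · rw [if_pos h]
    apply sieve_invariant n (I + 1) _ (by omega)
    intro p
    rw [markB_getD n I (by omega) (I * I) s p]
    by_cases hc : I * I ≤ p ∧ p < n ∧ I ∣ (p - I * I)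
    · rw [if_pos hc]
      obtain ⟨hc1, hc2, hc3⟩ := hc
      have hIp : I ∣ p := by
        have : p = (p - I * I) + I * I := by omega
        rw [this]
        exact Nat.dvd_add hc3 (Dvd.intro I rfl)
      simp only [Bool.false_eq_true, false_iff]
      rintro ⟨-, hall⟩
      exact hall I (by omega) hI hc1 hIp
    · rw [if_neg hc, hinv p]
      constructor
      · rintro ⟨hp, hall⟩
        refine ⟨hp, fun d hd h2 hdd hdvd => ?_⟩
        by_cases hdI : d < I
        · exact hall d hdI h2 hdd hdvd
        · have hdeq : d = I := by omega
          subst hdeq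
          exact hc ⟨hdd, hp, Nat.dvd_sub hdvd (Dvd.intro d rfl)⟩
      · rintro ⟨hp, hall⟩
        exact ⟨hp, fun d hd h2 hdd hdvd => hall d (by omega) h2 hdd hdvd⟩
  · rw [if_neg h]
    intro p
    rw [hinv p]
    constructor
    · rintro ⟨hp, hall⟩
      refine ⟨hp, fun d h2 hdd hdvd => ?_⟩
      have hdI : d < I := by
        by_contra hge
        have : I * I ≤ d * d := Nat.mul_le_mul (by omega) (by omega)
        omega
      exact hall d hdI h2 hdd hdvd
    · rintro ⟨hp, hall⟩
      exact ⟨hp, fun d _ h2 hdd hdvd => hall d h2 hdd hdvd⟩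
termination_by n - I
decreasing_by
  have : I * 1 ≤ I * I := Nat.mul_le_mul_left I (by omega)
  omega

lemma sieve_final (n : Nat) (p : Nat) :
    (sieveLoopB n 2 (List.replicate n true)).getD p false = true ↔ (p < n ∧ NoSmallDiv p) := by
  apply sieve_invariant n 2 _ (le_refl 2)
  intro q
  by_cases hq : q < n
  · rw [List.getD_eq_getElem?_getD, List.getElem?_replicate, if_pos hq]
    simp only [Option.getD_some, true_iff]
    exact ⟨hq, fun d hd h2 _ _ => by omega⟩
  · rw [List.getD_eq_getElem?_getD, List.getElem?_replicate, if_neg hq]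
    simp [hq]

lemma loops_eq (limit : Int) : ∀ (k : Nat) (sm : Int),
    a4Loop limit (k : Int) sm =
      sumB limit.toNat (sieveLoopB limit.toNat 2 (List.replicate limit.toNat true)) k sm := by
  intro k sm
  rw [a4Loop, sumB]
  by_cases h : k < limit.toNat
  · rw [if_pos (by omega), if_pos h]
    have hb : isprimeA (k : Int) =
        (sieveLoopB limit.toNat 2 (List.replicate limit.toNat true)).getD k false := by
      rw [Bool.eq_iff_iff, isprimeA_char k, sieve_final limit.toNat k]
      exact ⟨fun hn => ⟨h, hn⟩, fun hn => hn.2⟩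
    rw [hb]
    have : ((k : Int) + 1) = ((k + 1 : Nat) : Int) := by push_cast; ring
    rw [this]
    exact loops_eq limit (k + 1) _
  · rw [if_neg (by omega), if_neg h]
termination_by k => limit.toNat - k
decreasing_by omega

-- ===== VERDICT (by name: the statement is the Claim_ definition above) =====
theorem a4_spec : Claim_equal_a4 := by
  intro limit _
  unfold Spec_a4 a4 a4_alt
  rw [show ((2 : Int)) = ((2 : Nat) : Int) from rfl, loops_eq limit 2 0]
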